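-- pv_equiv track=rewrite | github.com/miliar/Code_Jam_Webscraper | solutions_python/Problem_204/279.py | findIngr
-- ===== SOURCE A (Python) =====
-- def findIngr(ingr,ingrPortions,solution,minI,maxI):
--
-- 	if ingr == len(ingrPortions):
-- 		return solution
--
-- 	for attempt in ingrPortions[ingr]:
-- 		newMin = max(attempt[0],minI)
-- 		newMax = min(attempt[1],maxI)
-- 		if newMax >= newMin:
-- 			result = findIngr(ingr+1,ingrPortions,solution+[attempt],newMin,newMax)
-- 			if result != None:
-- 				return result
--
-- 	return None
-- ===== SOURCE B (Python) =====
-- def _product(pools):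
--     if not pools:
--         return [[]]
--     rest = _product(pools[1:])
--     return [[a] + c for a in pools[0] for c in rest]
--
-- def findIngr(ingr, ingrPortions, solution, minI, maxI):
--     if ingr == len(ingrPortions):
--         return solution
--     for combo in _product(ingrPortions[ingr:]):
--         lo, hi = minI, maxI
--         for a, b in combo:
--             lo = max(lo, a)
--             hi = min(hi, b)
--         if hi >= lo:
--             return solution + combo
--     return None
-- ===== Notes on version B (the rewrite author's own statement) =====
-- stated objective: alternative
-- what changed: Replaces A's recursive backtracking (DFS with interval pruning and early return) by one linear scan over the explicitly built Cartesian product of the remaining portion lists, returning solution plus the first combination whose interval intersection with [minI, maxI] is nonempty.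
-- outside the precondition, e.g. on findIngr(-1, [[(0, 5)]], [], 0, 10): A returns [(0, 5), (0, 5)], B returns [(0, 5)]
import Mathlib
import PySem

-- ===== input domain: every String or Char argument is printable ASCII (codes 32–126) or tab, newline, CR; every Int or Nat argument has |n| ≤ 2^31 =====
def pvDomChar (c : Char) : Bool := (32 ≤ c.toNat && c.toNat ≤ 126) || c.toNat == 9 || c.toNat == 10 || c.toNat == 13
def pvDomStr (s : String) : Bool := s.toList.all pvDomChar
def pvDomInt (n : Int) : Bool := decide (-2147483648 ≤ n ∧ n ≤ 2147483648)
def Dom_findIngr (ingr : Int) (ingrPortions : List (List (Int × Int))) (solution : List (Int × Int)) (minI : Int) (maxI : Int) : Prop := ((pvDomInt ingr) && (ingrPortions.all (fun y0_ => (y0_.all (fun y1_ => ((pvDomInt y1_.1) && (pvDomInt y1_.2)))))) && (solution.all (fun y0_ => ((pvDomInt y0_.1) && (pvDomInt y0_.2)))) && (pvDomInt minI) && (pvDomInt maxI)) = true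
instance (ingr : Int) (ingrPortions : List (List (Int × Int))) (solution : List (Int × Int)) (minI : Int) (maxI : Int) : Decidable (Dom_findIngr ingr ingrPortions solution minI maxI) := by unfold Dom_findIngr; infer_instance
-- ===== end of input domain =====

-- B replaces A's recursive backtracking by one scan over the Cartesian product of the
-- remaining portion lists, returning the first combination whose interval intersection
-- with [minI, maxI] is nonempty (objective: alternative).

-- ===== PORT A =====
-- A's recursion plus its inner 'for attempt' loop with early return, as a mutual pair;
-- the hlt argument of the loop only justifies termination.
mutual
def findIngr (ingr : Int) (ingrPortions : List (List (Int × Int))) (solution : List (Int × Int)) (minI : Int) (maxI : Int) : Option (List (Int × Int)) :=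
  if ingr = (ingrPortions.length : Int) then some solution
  else
    match h : PySem.List.pyGet? ingrPortions ingr with
    | none => none            -- IndexError in Python; excluded by Pre_
    | some attempts =>
        findIngrLoop attempts ingr ingrPortions solution minI maxI
          (by
            by_contra hlt
            push_neg at hlt
            have hnone : PySem.List.pyGet? ingrPortions ingr = none :=
              (PySem.List.pyGet?_eq_none_iff ingrPortions ingr).mpr
                (fun hin => absurd hin.2 (not_lt.mpr hlt))
            rw [hnone] at h
            cases h)
termination_by ((ingrPortions.length - ingr).toNat, 1, 0)

def findIngrLoop (attempts : List (Int × Int)) (ingr : Int) (ingrPortions : List (List (Int × Int))) (solution : List (Int × Int)) (minI : Int) (maxI : Int) (hlt : ingr < (ingrPortions.length : Int)) : Option (List (Int × Int)) :=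
  match attempts with
  | [] => none
  | attempt :: rest =>
      let newMin := max attempt.1 minI
      let newMax := min attempt.2 maxI
      if newMax ≥ newMin then
        match findIngr (ingr + 1) ingrPortions (solution ++ [attempt]) newMin newMax with
        | some result => some result
        | none => findIngrLoop rest ingr ingrPortions solution minI maxI hlt
      else findIngrLoop rest ingr ingrPortions solution minI maxI hlt
termination_by ((ingrPortions.length - ingr).toNat, 0, attempts.length)
end

-- ===== PORT B =====
-- B-side helper: the recursive Cartesian product (Source B's _product).
def pvProduct : List (List (Int × Int)) → List (List (Int × Int))
  | [] => [[]]
  | p :: ps => p.flatMap (fun a => (pvProduct ps).map (fun c => a :: c))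

-- B-side helper: the inner 'for a, b in combo' interval fold of Source B.
def pvInterval (combo : List (Int × Int)) (lo hi : Int) : Int × Int :=
  combo.foldl (fun acc ab => (max acc.1 ab.1, min acc.2 ab.2)) (lo, hi)

def findIngr_alt (ingr : Int) (ingrPortions : List (List (Int × Int))) (solution : List (Int × Int)) (minI : Int) (maxI : Int) : Option (List (Int × Int)) :=
  if ingr = (ingrPortions.length : Int) then some solution
  else
    match (pvProduct (PySem.List.slice ingrPortions (some ingr) none)).find?
        (fun combo => (pvInterval combo minI maxI).2 ≥ (pvInterval combo minI maxI).1) with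
    | some combo => some (solution ++ combo)
    | none => none

-- ===== PRECONDITION & SPEC =====
-- Pre_ restricts to the recursion's natural domain 0 ≤ ingr ≤ len(ingrPortions): for
-- ingr > len or ingr < -len Python A raises IndexError, and for -len ≤ ingr < 0 A's
-- negative-index wraparound accidentally re-processes the whole list after the tail
-- (see cites), which is outside the function's intended use.
def Pre_findIngr (ingr : Int) (ingrPortions : List (List (Int × Int))) (solution : List (Int × Int)) (minI : Int) (maxI : Int) : Prop :=
  0 ≤ ingr ∧ ingr ≤ (ingrPortions.length : Int)
instance (ingr : Int) (ingrPortions : List (List (Int × Int))) (solution : List (Int × Int)) (minI : Int) (maxI : Int) : Decidable (Pre_findIngr ingr ingrPortions solution minI maxI) := by unfold Pre_findIngr; infer_instance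

def pvWitness_findIngr : Int × (List (List (Int × Int))) × (List (Int × Int)) × Int × Int :=
  (0, [[(0, 5), (3, 8)], [(4, 9)]], [], 0, 10)

def Spec_findIngr (ingr : Int) (ingrPortions : List (List (Int × Int))) (solution : List (Int × Int)) (minI : Int) (maxI : Int) (out : Option (List (Int × Int))) : Prop := out = findIngr_alt ingr ingrPortions solution minI maxI
instance (ingr : Int) (ingrPortions : List (List (Int × Int))) (solution : List (Int × Int)) (minI : Int) (maxI : Int) (out : Option (List (Int × Int))) : Decidable (Spec_findIngr ingr ingrPortions solution minI maxI out) := by unfold Spec_findIngr; infer_instance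

-- ===== CLAIM (what is proved, stated in full; the proofs are below) =====
def Claim_equal_findIngr : Prop := ∀ (ingr : Int) (ingrPortions : List (List (Int × Int))) (solution : List (Int × Int)) (minI : Int) (maxI : Int), Dom_findIngr ingr ingrPortions solution minI maxI → Pre_findIngr ingr ingrPortions solution minI maxI → Spec_findIngr ingr ingrPortions solution minI maxI (findIngr ingr ingrPortions solution minI maxI)

-- ===== LEMMAS AND PROOFS =====

-- Proof-side restatement of A's recursion, indexed by the list of remaining portion lists.
mutual
def goA : List (List (Int × Int)) → List (Int × Int) → Int → Int → Option (List (Int × Int))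
  | [], solution, _, _ => some solution
  | attempts :: ps, solution, lo, hi => goALoop attempts ps solution lo hi
termination_by l _ _ _ => (l.length, 1, 0)

def goALoop : List (Int × Int) → List (List (Int × Int)) → List (Int × Int) → Int → Int → Option (List (Int × Int))
  | [], _, _, _, _ => none
  | attempt :: rest, ps, solution, lo, hi =>
      let newMin := max attempt.1 lo
      let newMax := min attempt.2 hi
      if newMax ≥ newMin then
        match goA ps (solution ++ [attempt]) newMin newMax with
        | some result => some result
        | none => goALoop rest ps solution lo hi
      else goALoop rest ps solution lo hi
termination_by attempts ps _ _ _ => (ps.length + 1, 0, attempts.length)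
end

-- the find?-based form of B's scan
def goB (ps : List (List (Int × Int))) (solution : List (Int × Int)) (lo hi : Int) : Option (List (Int × Int)) :=
  match (pvProduct ps).find? (fun combo => (pvInterval combo lo hi).2 ≥ (pvInterval combo lo hi).1) with
  | some combo => some (solution ++ combo)
  | none => none

theorem pvInterval_cons (a : Int × Int) (c : List (Int × Int)) (lo hi : Int) :
    pvInterval (a :: c) lo hi = pvInterval c (max lo a.1) (min hi a.2) := by
  simp [pvInterval]

theorem pvInterval_shrinks (c : List (Int × Int)) (lo hi : Int) :
    (pvInterval c lo hi).1 ≥ lo ∧ (pvInterval c lo hi).2 ≤ hi := by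
  induction c generalizing lo hi with
  | nil => simp [pvInterval]
  | cons a c ih =>
      rw [pvInterval_cons]
      rcases ih (max lo a.1) (min hi a.2) with ⟨h1, h2⟩
      exact ⟨le_trans (le_max_left _ _) h1, le_trans h2 (min_le_left _ _)⟩

theorem find?_flatMap {α β : Type} (l : List α) (f : α → List β) (p : β → Bool) :
    (l.flatMap f).find? p = l.findSome? (fun a => (f a).find? p) := by
  induction l with
  | nil => simp
  | cons a l ih =>
      simp only [List.flatMap_cons, List.find?_append, List.findSome?_cons]
      cases h : (f a).find? p with
      | some b => simp
      | none => simp [ih]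

theorem find?_map_cons (a : Int × Int) (cs : List (List (Int × Int))) (lo hi : Int) :
    (cs.map (fun c => a :: c)).find? (fun combo => (pvInterval combo lo hi).2 ≥ (pvInterval combo lo hi).1)
      = (cs.find? (fun c => (pvInterval c (max lo a.1) (min hi a.2)).2 ≥ (pvInterval c (max lo a.1) (min hi a.2)).1)).map (fun c => a :: c) := by
  rw [List.find?_map]
  congr 1

-- main correspondence: A's pruned DFS equals B's scan of the full product,
-- provided the interval is nonempty whenever the remaining list is empty.
theorem goA_eq_goB (ps : List (List (Int × Int))) (solution : List (Int × Int)) (lo hi : Int)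
    (h : ps = [] → lo ≤ hi) : goA ps solution lo hi = goB ps solution lo hi := by
  induction ps generalizing solution lo hi with
  | nil => simp [goA, goB, pvProduct, pvInterval, h rfl]
  | cons attempts ps ih =>
      rw [goA]
      unfold goB pvProduct
      rw [find?_flatMap]
      induction attempts with
      | nil => simp [goALoop]
      | cons attempt rest ihr =>
          rw [List.findSome?_cons, find?_map_cons]
          by_cases hc : min attempt.2 hi ≥ max attempt.1 lo
          · have hrec := ih (solution ++ [attempt]) (max attempt.1 lo) (min attempt.2 hi)
              (fun _ => hc)
            rw [goALoop]
            simp only [hc, if_pos]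
            rw [hrec]
            unfold goB
            rw [max_comm attempt.1 lo, min_comm attempt.2 hi]
            cases hf : (pvProduct ps).find? (fun c => decide ((pvInterval c (max lo attempt.1) (min hi attempt.2)).1 ≤ (pvInterval c (max lo attempt.1) (min hi attempt.2)).2)) with
            | some c => simp [List.append_assoc]
            | none => simpa [hf] using ihr
          · have hnone : (pvProduct ps).find? (fun c => decide ((pvInterval c (max lo attempt.1) (min hi attempt.2)).1 ≤ (pvInterval c (max lo attempt.1) (min hi attempt.2)).2)) = none := by
              apply List.find?_eq_none.mpr
              intro c _
              simp only [decide_eq_true_eq]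
              have := pvInterval_shrinks c (max lo attempt.1) (min hi attempt.2)
              push_neg at hc ⊢
              omega
            rw [goALoop]
            simp only [ge_iff_le, not_le] at hc
            rw [if_neg (by omega)]
            rw [hnone]
            simpa using ihr

-- the Int-indexed port equals goA on the dropped suffix, for 0 ≤ ingr ≤ len
theorem findIngrLoop_eq_goALoop (attempts : List (Int × Int)) (n : Nat) (pools : List (List (Int × Int))) (solution : List (Int × Int)) (lo hi : Int) (hlt : (n : Int) < (pools.length : Int)) (IH : ∀ sol lo hi, findIngr ((n : Int) + 1) pools sol lo hi = goA (pools.drop (n + 1)) sol lo hi) :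
    findIngrLoop attempts (n : Int) pools solution lo hi hlt = goALoop attempts (pools.drop (n + 1)) solution lo hi := by
  induction attempts generalizing solution lo hi with
  | nil => rw [findIngrLoop, goALoop]
  | cons attempt rest ihr =>
      rw [findIngrLoop, goALoop]
      by_cases hc : min attempt.2 hi ≥ max attempt.1 lo
      · simp only [hc, if_pos]
        rw [IH]
        cases goA (pools.drop (n + 1)) (solution ++ [attempt]) (max attempt.1 lo) (min attempt.2 hi) with
        | some r => rfl
        | none => exact ihr solution lo hi
      · simp only [ge_iff_le, not_le] at hc
        rw [if_neg (by omega), if_neg (by omega)]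
        exact ihr solution lo hi

theorem findIngr_eq_goA (k : Nat) (n : Nat) (pools : List (List (Int × Int))) (solution : List (Int × Int)) (lo hi : Int)
    (hk : pools.length - n ≤ k) (hle : n ≤ pools.length) :
    findIngr (n : Int) pools solution lo hi = goA (pools.drop n) solution lo hi := by
  induction k generalizing n solution lo hi with
  | zero =>
      have hn : n = pools.length := by omega
      subst hn
      rw [findIngr]
      simp [List.drop_length, goA]
  | succ k ih =>
      rw [findIngr]
      by_cases heq : (n : Int) = (pools.length : Int)
      · have : n = pools.length := by exact_mod_cast heq
        subst this
        simp [List.drop_length, goA]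
      · have hlt : n < pools.length := by
          have : (n : Int) ≤ (pools.length : Int) := by exact_mod_cast hle
          omega
        simp only [heq, if_neg, not_false_iff]
        split
        · rename_i hnone
          rw [PySem.List.pyGet?_ofNat pools n hlt] at hnone
          cases hnone
        · rename_i attempts hsome
          rw [PySem.List.pyGet?_ofNat pools n hlt] at hsome
          obtain rfl : pools[n] = attempts := by injection hsome
          rw [List.drop_eq_getElem_cons hlt]
          rw [goA]
          apply findIngrLoop_eq_goALoop
          intro sol lo' hi'
          have hcast : ((n : Int) + 1) = ((n + 1 : Nat) : Int) := by push_cast; ring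
          rw [hcast]
          exact ih (n + 1) sol lo' hi' (by omega) (by omega)

-- ===== VERDICT (by name: the statement is the Claim_ definition above) =====
theorem findIngr_spec : Claim_equal_findIngr := by
  intro ingr pools solution minI maxI _ hpre
  unfold Spec_findIngr
  obtain ⟨h0, hle⟩ := hpre
  obtain ⟨n, rfl⟩ : ∃ n : Nat, ingr = (n : Int) := ⟨ingr.toNat, (Int.toNat_of_nonneg h0).symm⟩
  have hlen : n ≤ pools.length := by exact_mod_cast hle
  rw [findIngr_eq_goA (pools.length - n) n pools solution minI maxI (le_refl _) hlen]
  unfold findIngr_alt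
  by_cases heq : (n : Int) = (pools.length : Int)
  · have : n = pools.length := by exact_mod_cast heq
    subst this
    simp [List.drop_length, goA]
  · have hlt : n < pools.length := by
      have h1 : (n : Int) ≤ (pools.length : Int) := hle
      omega
    simp only [heq, if_neg, not_false_iff]
    rw [PySem.List.slice_from_natCast]
    rw [goA_eq_goB (pools.drop n) solution minI maxI
      (by intro hnil; exfalso; have := List.drop_eq_nil_iff.mp hnil; omega)]
    rfl
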